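-- pv_equiv track=rewrite | github.com/RishbhaJain/inclusive-voice-agent | voicebot/retired/dialect_classifier.py | _keyword_disambiguate
-- ===== SOURCE A (Python) =====
-- SOUTHERN_MARKERS = frozenset({
--     "y'all", "yall", "fixin", "reckon", "bless", "yonder", "ain't",
--     "holler", "fixin'", "dadgum", "howdy", "doggone",
-- })
--
-- SANDIEGO_MARKERS = frozenset({
--     "like", "totally", "dude", "stoked", "super", "hella",
--     "basically", "legit", "gnarly", "bro",
-- })
--
-- SOUTHERN_THRESHOLD = 2
--
-- SANDIEGO_THRESHOLD = 3
--
-- def _keyword_disambiguate(transcript: str) -> str: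
--     """
--     Scan transcript for dialect markers and return the best-fit dialect name.
--     Returns "neutral" if no clear signal is found.
--     """
--     words = transcript.lower().split()
--     southern_hits = sum(1 for w in words if w in SOUTHERN_MARKERS)
--     sandiego_hits = sum(1 for w in words if w in SANDIEGO_MARKERS)
--
--     if southern_hits >= SOUTHERN_THRESHOLD:
--         return "southern"
--     if sandiego_hits >= SANDIEGO_THRESHOLD:
--         return "sandiego"
--     return "neutral"
-- ===== SOURCE B (Python) =====
-- SOUTHERN_MARKERS = frozenset({
--     "y'all", "yall", "fixin", "reckon", "bless", "yonder", "ain't",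
--     "holler", "fixin'", "dadgum", "howdy", "doggone",
-- })
--
-- SANDIEGO_MARKERS = frozenset({
--     "like", "totally", "dude", "stoked", "super", "hella",
--     "basically", "legit", "gnarly", "bro",
-- })
--
-- SOUTHERN_THRESHOLD = 2
-- SANDIEGO_THRESHOLD = 3
--
--
-- def _keyword_disambiguate(transcript: str) -> str:
--     # single pass, early exit: southern has priority, so the moment the
--     # SOUTHERN_THRESHOLD-th southern marker appears the answer is fixed.
--     # The two marker sets are disjoint, so elif loses nothing.
--     southern = sandiego = 0
--     for w in transcript.lower().split():
--         if w in SOUTHERN_MARKERS: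
--             southern += 1
--             if southern >= SOUTHERN_THRESHOLD:
--                 return "southern"
--         elif w in SANDIEGO_MARKERS:
--             sandiego += 1
--     return "sandiego" if sandiego >= SANDIEGO_THRESHOLD else "neutral"
-- ===== Notes on version B (the rewrite author's own statement) =====
-- stated objective: alternative
-- what changed: B replaces A's two separate full scans of the word list by a single streaming pass with two accumulators that returns early with the southern verdict as soon as its threshold is reached (valid because that verdict has priority and the marker sets are disjoint).
import Mathlib
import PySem

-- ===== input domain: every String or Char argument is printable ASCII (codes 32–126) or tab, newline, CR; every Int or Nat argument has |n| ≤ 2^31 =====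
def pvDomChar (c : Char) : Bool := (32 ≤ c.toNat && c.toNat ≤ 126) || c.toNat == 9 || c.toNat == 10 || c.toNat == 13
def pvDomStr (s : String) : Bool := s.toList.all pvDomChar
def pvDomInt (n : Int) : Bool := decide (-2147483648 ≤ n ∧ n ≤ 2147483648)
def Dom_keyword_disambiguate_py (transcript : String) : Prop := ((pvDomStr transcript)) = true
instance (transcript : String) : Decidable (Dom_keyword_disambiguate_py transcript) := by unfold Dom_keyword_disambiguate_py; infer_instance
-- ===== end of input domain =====

-- B replaces A's two full scans by one streaming pass with two accumulators and an
-- early return on the second southern marker; same result (alternative decomposition).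

-- ===== PORT A =====
def southernMarkers : List String :=
  ["y'all", "yall", "fixin", "reckon", "bless", "yonder", "ain't",
   "holler", "fixin'", "dadgum", "howdy", "doggone"]

def sandiegoMarkers : List String :=
  ["like", "totally", "dude", "stoked", "super", "hella",
   "basically", "legit", "gnarly", "bro"]

-- literal port of A: split the lowered transcript, sum 1 per word in each marker set,
-- then test the two thresholds in order
def keyword_disambiguate_py (transcript : String) : String :=
  let words := PySem.Str.split₀ (PySem.Str.lower transcript)
  let southern_hits : Int := (words.map (fun w => if southernMarkers.contains w then (1 : Int) else 0)).sum
  let sandiego_hits : Int := (words.map (fun w => if sandiegoMarkers.contains w then (1 : Int) else 0)).sum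
  if southern_hits ≥ 2 then "southern"
  else if sandiego_hits ≥ 3 then "sandiego"
  else "neutral"

-- ===== PORT B =====
-- literal port of B's loop: one pass, two accumulators, early return "southern"
def pvAltLoop : List String → Int → Int → String
  | [], _, sandiego => if sandiego ≥ 3 then "sandiego" else "neutral"
  | w :: ws, southern, sandiego =>
    if southernMarkers.contains w then
      if southern + 1 ≥ 2 then "southern" else pvAltLoop ws (southern + 1) sandiego
    else if sandiegoMarkers.contains w then pvAltLoop ws southern (sandiego + 1)
    else pvAltLoop ws southern sandiego

def keyword_disambiguate_py_alt (transcript : String) : String :=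
  pvAltLoop (PySem.Str.split₀ (PySem.Str.lower transcript)) 0 0

-- ===== PRECONDITION & SPEC =====
def Spec_keyword_disambiguate_py (transcript : String) (out : String) : Prop := out = keyword_disambiguate_py_alt transcript
instance (transcript : String) (out : String) : Decidable (Spec_keyword_disambiguate_py transcript out) := by unfold Spec_keyword_disambiguate_py; infer_instance

-- ===== CLAIM (what is proved, stated in full; the proofs are below) =====
def Claim_equal_keyword_disambiguate_py : Prop := ∀ (transcript : String), Dom_keyword_disambiguate_py transcript → Spec_keyword_disambiguate_py transcript (keyword_disambiguate_py transcript)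

-- ===== LEMMAS AND PROOFS =====

-- A's per-set hit count, abbreviated for the lemmas
def pvHits (ms ws : List String) : Int :=
  (ws.map (fun w => if ms.contains w then (1 : Int) else 0)).sum

lemma pvHits_nonneg (ms ws : List String) : 0 ≤ pvHits ms ws := by
  induction ws with
  | nil => simp [pvHits]
  | cons w ws ih =>
    simp only [pvHits, List.map_cons, List.sum_cons] at *
    split_ifs <;> omega

-- the two marker sets are disjoint
lemma markers_disjoint (w : String) (h : southernMarkers.contains w = true) :
    sandiegoMarkers.contains w = false := by
  simp only [southernMarkers, List.contains_eq_mem, List.mem_cons, List.not_mem_nil,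
    or_false, decide_eq_true_eq] at h
  rcases h with h|h|h|h|h|h|h|h|h|h|h|h <;> subst h <;> decide

-- pvHits unfolds one word at a time
lemma pvHits_cons (ms : List String) (w : String) (ws : List String) :
    pvHits ms (w :: ws) = (if ms.contains w then 1 else 0) + pvHits ms ws := by
  simp [pvHits]

-- the streaming loop computes exactly the staged-threshold result
lemma pvAltLoop_eq (ws : List String) : ∀ (so sd : Int), so ≤ 1 →
    pvAltLoop ws so sd =
      (if so + pvHits southernMarkers ws ≥ 2 then "southern"
       else if sd + pvHits sandiegoMarkers ws ≥ 3 then "sandiego"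
       else "neutral") := by
  induction ws with
  | nil =>
    intro so sd hso
    simp only [pvAltLoop, pvHits, List.map_nil, List.sum_nil, add_zero]
    rw [if_neg (show ¬ so ≥ 2 by omega)]
  | cons w ws ih =>
    intro so sd hso
    by_cases hS : southernMarkers.contains w = true
    · have hG := markers_disjoint w hS
      simp only [pvAltLoop, hS, pvHits_cons, hG, Bool.false_eq_true, if_true, if_false, zero_add]
      by_cases h2 : so + 1 ≥ 2
      · have := pvHits_nonneg southernMarkers ws
        rw [if_pos h2, if_pos (by omega)]
      · rw [if_neg h2, ih (so + 1) sd (by omega)]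
        have h3 : so + (1 + pvHits southernMarkers ws) = so + 1 + pvHits southernMarkers ws := by ring
        rw [h3]
    · have hS' : southernMarkers.contains w = false := by
        revert hS; cases southernMarkers.contains w <;> simp
      by_cases hG : sandiegoMarkers.contains w = true
      · simp only [pvAltLoop, hS', hG, Bool.false_eq_true, if_false, if_true, pvHits_cons, zero_add]
        rw [ih so (sd + 1) hso]
        have h3 : sd + (1 + pvHits sandiegoMarkers ws) = sd + 1 + pvHits sandiegoMarkers ws := by ring
        rw [h3]
      · have hG' : sandiegoMarkers.contains w = false := by
          revert hG; cases sandiegoMarkers.contains w <;> simp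
        simp only [pvAltLoop, hS', hG', Bool.false_eq_true, if_false, pvHits_cons, zero_add]
        exact ih so sd hso

-- ===== VERDICT (by name: the statement is the Claim_ definition above) =====
theorem keyword_disambiguate_py_spec : Claim_equal_keyword_disambiguate_py := by
  intro transcript _
  unfold Spec_keyword_disambiguate_py keyword_disambiguate_py keyword_disambiguate_py_alt
  rw [pvAltLoop_eq _ 0 0 (by omega)]
  simp [pvHits]
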